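-- pv_equiv track=rewrite | github.com/l1asis/rsa-educational-messenger | src/rsa_messenger/crypto.py | lucas_sequences_second_kind
-- ===== SOURCE A (Python) =====
-- def lucas_sequences_second_kind(n: int, p: int, q: int) -> int:
--     """Calculate the nth Lucas sequence of the second kind with parameters p and q."""
--     if n == 0:
--         return 2
--     n -= 1
--     a11, a12, a21, a22 = 0, 1, -q, p
--     b11, b12, b21, b22 = a11, a12, a21, a22
--     while n > 0:
--         if n % 2 == 1:
--             b11, b12, b21, b22 = a11*b11+a12*b21, a11*b12+a12*b22, a21*b11+a22*b21, a21*b12+a22*b22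
--         a11, a12, a21, a22 = a11*a11+a12*a21, a11*a12+a12*a22, a21*a11+a22*a21, a21*a12+a22*a22
--         n //= 2
--     return b11*2+b12*p
-- ===== SOURCE B (Python) =====
-- def lucas_sequences_second_kind(n: int, p: int, q: int) -> int:
--     """Calculate the nth Lucas sequence of the second kind with parameters p and q."""
--     if n == 0:
--         return 2
--     # binary digits of n below the most significant bit, LSB first
--     bits = []
--     m = n
--     while m > 1:
--         bits.append(m % 2)
--         m //= 2
--     # MSB-first doubling on the pair (V_k, V_{k+1}) with qk = q**k, starting at k = 1
--     V, W, qk = p, p * p - 2 * q, q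
--     for b in reversed(bits):
--         if b:
--             V, W, qk = V * W - p * qk, W * W - 2 * qk * q, qk * qk * q
--         else:
--             V, W, qk = V * V - 2 * qk, V * W - p * qk, qk * qk
--     return V
-- ===== Notes on version B (the rewrite author's own statement) =====
-- stated objective: faster
-- what changed: Replaces A's 2x2-matrix exponentiation-by-squaring with MSB-first Lucas fast doubling on the pair (V_k, V_{k+1}) and a running power of q, using V_2k = V_k^2 - 2q^k and V_2k+1 = V_k V_{k+1} - p q^k.
import Mathlib
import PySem

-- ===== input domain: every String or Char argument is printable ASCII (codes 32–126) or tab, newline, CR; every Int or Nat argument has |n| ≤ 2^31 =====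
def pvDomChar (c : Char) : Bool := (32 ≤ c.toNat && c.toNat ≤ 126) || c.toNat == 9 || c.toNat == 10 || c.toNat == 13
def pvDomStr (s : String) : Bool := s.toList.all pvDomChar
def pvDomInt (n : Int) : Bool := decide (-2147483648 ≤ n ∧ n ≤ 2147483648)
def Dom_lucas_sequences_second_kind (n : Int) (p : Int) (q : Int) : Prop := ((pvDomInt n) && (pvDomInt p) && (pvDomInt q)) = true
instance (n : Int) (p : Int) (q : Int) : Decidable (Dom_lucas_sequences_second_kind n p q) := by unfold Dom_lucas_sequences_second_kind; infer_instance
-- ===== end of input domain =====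

-- B replaces A's 2x2-matrix exponentiation-by-squaring with MSB-first Lucas fast doubling on the
-- pair (V_k, V_{k+1}) plus a running power of q (alternative algorithm, similar cost).

-- ===== PORT A =====
-- A's while loop: state (a11,a12,a21,a22,b11,b12,b21,b22), n halved each round
def lucasA_loop (a11 a12 a21 a22 b11 b12 b21 b22 m : Int) : Int × Int × Int × Int :=
  if _h : m > 0 then
    let b' : Int × Int × Int × Int :=
      if PySem.Int.mod m 2 = 1 then
        (a11*b11+a12*b21, a11*b12+a12*b22, a21*b11+a22*b21, a21*b12+a22*b22)
      else (b11, b12, b21, b22)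
    lucasA_loop (a11*a11+a12*a21) (a11*a12+a12*a22) (a21*a11+a22*a21) (a21*a12+a22*a22)
      b'.1 b'.2.1 b'.2.2.1 b'.2.2.2 (PySem.Int.floordiv m 2)
  else (b11, b12, b21, b22)
termination_by m.toNat
decreasing_by
  rw [PySem.Int.floordiv_eq_ediv_of_pos (by norm_num)]
  omega

def lucas_sequences_second_kind (n : Int) (p : Int) (q : Int) : Int :=
  if n = 0 then 2
  else
    let r := lucasA_loop 0 1 (-q) p 0 1 (-q) p (n - 1)
    r.1 * 2 + r.2.1 * p

-- ===== PORT B =====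
-- bits of m below its most significant bit, least significant first (B's first while loop)
def lucasB_bits (m : Int) : List Int :=
  if _h : m > 1 then PySem.Int.mod m 2 :: lucasB_bits (PySem.Int.floordiv m 2) else []
termination_by m.toNat
decreasing_by
  rw [PySem.Int.floordiv_eq_ediv_of_pos (by norm_num)]
  omega

-- one doubling step on (V, W, qk) (B's for-loop body)
def lucasB_step (p q : Int) (s : Int × Int × Int) (b : Int) : Int × Int × Int :=
  if b ≠ 0 then (s.1 * s.2.1 - p * s.2.2, s.2.1 * s.2.1 - 2 * s.2.2 * q, s.2.2 * s.2.2 * q)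
  else (s.1 * s.1 - 2 * s.2.2, s.1 * s.2.1 - p * s.2.2, s.2.2 * s.2.2)

def lucas_sequences_second_kind_alt (n : Int) (p : Int) (q : Int) : Int :=
  if n = 0 then 2
  else ((lucasB_bits n).reverse.foldl (lucasB_step p q) (p, p * p - 2 * q, q)).1

-- ===== PRECONDITION & SPEC =====
def Spec_lucas_sequences_second_kind (n : Int) (p : Int) (q : Int) (out : Int) : Prop := out = lucas_sequences_second_kind_alt n p q
instance (n : Int) (p : Int) (q : Int) (out : Int) : Decidable (Spec_lucas_sequences_second_kind n p q out) := by unfold Spec_lucas_sequences_second_kind; infer_instance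

-- ===== CLAIM (what is proved, stated in full; the proofs are below) =====
def Claim_equal_lucas_sequences_second_kind : Prop := ∀ (n : Int) (p : Int) (q : Int), Dom_lucas_sequences_second_kind n p q → Spec_lucas_sequences_second_kind n p q (lucas_sequences_second_kind n p q)

-- ===== LEMMAS AND PROOFS =====

-- the Lucas sequence of the second kind, the common reference of both proofs
def lucasV (p q : Int) : Nat → Int
  | 0 => 2
  | 1 => p
  | (k+2) => p * lucasV p q (k+1) - q * lucasV p q k

theorem lucasV_rec (p q : Int) (k : Nat) :
    lucasV p q (k+2) = p * lucasV p q (k+1) - q * lucasV p q k := rfl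

-- 2x2 integer matrices, for reasoning about A's loop
structure Mat2 where
  a : Int
  b : Int
  c : Int
  d : Int
deriving DecidableEq, Repr

def mmul (x y : Mat2) : Mat2 :=
  ⟨x.a*y.a + x.b*y.c, x.a*y.b + x.b*y.d, x.c*y.a + x.d*y.c, x.c*y.b + x.d*y.d⟩

def mone : Mat2 := ⟨1, 0, 0, 1⟩

def mpow (x : Mat2) : Nat → Mat2
  | 0 => mone
  | (k+1) => mmul x (mpow x k)

theorem mmul_one_left (x : Mat2) : mmul mone x = x := by
  simp [mmul, mone]

theorem mmul_assoc (x y z : Mat2) : mmul (mmul x y) z = mmul x (mmul y z) := by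
  simp only [mmul, Mat2.mk.injEq]
  refine ⟨by ring, by ring, by ring, by ring⟩

theorem mpow_mul_base (x : Mat2) (k : Nat) : mmul (mpow x k) x = mmul x (mpow x k) := by
  induction k with
  | zero => simp [mpow, mmul, mone]
  | succ k ih => simp only [mpow]; rw [mmul_assoc, ih]

theorem mpow_succ_right (x : Mat2) (k : Nat) : mmul (mpow x k) x = mpow x (k+1) := by
  rw [mpow_mul_base]; rfl

theorem mpow_sq (x : Mat2) (k : Nat) : mpow (mmul x x) k = mpow x (2*k) := by
  induction k with
  | zero => rfl
  | succ k ih =>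
    have h : 2*(k+1) = (2*k)+1+1 := by ring
    rw [h]
    simp only [mpow, ih]
    rw [mmul_assoc]

theorem lucasA_loop_eq (k : Nat) (x y : Mat2) (m : Int) (hm : 0 ≤ m) (hk : m.toNat = k) :
    lucasA_loop x.a x.b x.c x.d y.a y.b y.c y.d m =
      ((mmul (mpow x k) y).a, (mmul (mpow x k) y).b, (mmul (mpow x k) y).c, (mmul (mpow x k) y).d) := by
  induction k using Nat.strong_induction_on generalizing x y m with
  | _ k ih =>
    rw [lucasA_loop]
    by_cases hpos : m > 0
    · rw [dif_pos hpos]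
      have h2 : PySem.Int.floordiv m 2 = m / 2 := PySem.Int.floordiv_eq_ediv_of_pos (by norm_num)
      have hmod : PySem.Int.mod m 2 = m % 2 := PySem.Int.mod_eq_emod_of_pos (by norm_num)
      have hm2 : 0 ≤ m / 2 := by omega
      have hlt : (m / 2).toNat < k := by omega
      by_cases hodd : m % 2 = 1
      · have hck : k = 2 * (m / 2).toNat + 1 := by omega
        rw [hmod, if_pos hodd, h2]
        have hrec := ih (m / 2).toNat hlt (mmul x x) (mmul x y) (m / 2) hm2 rfl
        rw [mpow_sq, ← mmul_assoc, mpow_succ_right] at hrec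
        simp only [mmul] at hrec ⊢
        rw [hck]
        exact hrec
      · have hck : k = 2 * (m / 2).toNat := by omega
        rw [hmod, if_neg hodd, h2]
        have hrec := ih (m / 2).toNat hlt (mmul x x) y (m / 2) hm2 rfl
        rw [mpow_sq] at hrec
        simp only [mmul] at hrec ⊢
        rw [hck]
        exact hrec
    · rw [dif_neg hpos]
      have hk0 : k = 0 := by omega
      subst hk0
      simp [mpow, mmul_one_left]

-- the first row of M^k, applied to (2, p), is (V_k, V_{k+1})
theorem mpow_entries (p q : Int) (k : Nat) :
    (mpow ⟨0, 1, -q, p⟩ k).a * 2 + (mpow ⟨0, 1, -q, p⟩ k).b * p = lucasV p q k ∧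
    (mpow ⟨0, 1, -q, p⟩ k).c * 2 + (mpow ⟨0, 1, -q, p⟩ k).d * p = lucasV p q (k+1) := by
  induction k with
  | zero => simp [mpow, mone, lucasV]
  | succ k ih =>
    obtain ⟨h1, h2⟩ := ih
    constructor
    · simp only [mpow, mmul]
      linear_combination h2
    · simp only [mpow, mmul]
      rw [lucasV_rec]
      linear_combination p * h2 - q * h1

-- Catalan-style identity: V_{k+1}^2 = V_k V_{k+2} - q^k (p^2 - 4q)
theorem lucasV_catalan (p q : Int) (k : Nat) :
    lucasV p q (k+1) * lucasV p q (k+1)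
      = lucasV p q k * lucasV p q (k+2) - q^k * (p^2 - 4*q) := by
  induction k with
  | zero => simp only [lucasV, pow_zero]; ring
  | succ k ih =>
    rw [lucasV_rec p q (k+1), lucasV_rec p q k, pow_succ]
    rw [lucasV_rec p q k] at ih
    linear_combination q * ih

-- doubling identities
theorem lucasV_double (p q : Int) (k : Nat) :
    lucasV p q (2*k) = lucasV p q k * lucasV p q k - 2 * q^k ∧
    lucasV p q (2*k+1) = lucasV p q k * lucasV p q (k+1) - p * q^k := by
  induction k with
  | zero =>
    constructor <;> simp [lucasV] <;> omega
  | succ k ih =>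
    obtain ⟨h1, h2⟩ := ih
    have hc := lucasV_catalan p q k
    rw [lucasV_rec p q k] at hc
    have e1 : 2*(k+1) = (2*k)+2 := by ring
    have hfirst : lucasV p q (2*(k+1)) = lucasV p q (k+1) * lucasV p q (k+1) - 2 * q^(k+1) := by
      rw [e1, lucasV_rec, h1, h2, pow_succ]
      linear_combination -hc
    refine ⟨hfirst, ?_⟩
    have e2 : 2*(k+1)+1 = (2*k+1)+2 := by ring
    have e1' : 2*k+1+1 = 2*(k+1) := by ring
    have e3 : k+1+1 = k+2 := by ring
    rw [e2, lucasV_rec, e1', hfirst, h2, e3, lucasV_rec, pow_succ]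
    ring

-- B's fold computes (V_k, V_{k+1}, q^k) where k is the value of the consumed bit prefix
theorem lucasB_fold_eq (p q : Int) (k : Nat) (m : Int) (hm : 1 ≤ m) (hk : m.toNat = k) :
    (lucasB_bits m).reverse.foldl (lucasB_step p q) (p, p * p - 2 * q, q)
      = (lucasV p q k, lucasV p q (k+1), q^k) := by
  induction k using Nat.strong_induction_on generalizing m with
  | _ k ih =>
    rw [lucasB_bits]
    by_cases hgt : m > 1
    · rw [dif_pos hgt]
      have h2 : PySem.Int.floordiv m 2 = m / 2 := PySem.Int.floordiv_eq_ediv_of_pos (by norm_num)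
      have hmod : PySem.Int.mod m 2 = m % 2 := PySem.Int.mod_eq_emod_of_pos (by norm_num)
      have hm2 : 1 ≤ m / 2 := by omega
      have hlt : (m / 2).toNat < k := by omega
      rw [h2, hmod, List.reverse_cons, List.foldl_append]
      rw [ih (m / 2).toNat hlt (m / 2) hm2 rfl]
      simp only [List.foldl_cons, List.foldl_nil]
      set k' := (m / 2).toNat with hk'
      obtain ⟨d1, d2⟩ := lucasV_double p q k'
      obtain ⟨d1', d2'⟩ := lucasV_double p q (k'+1)
      by_cases hodd : m % 2 = 1
      · have hck : k = 2 * k' + 1 := by omega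
        rw [hodd]
        simp only [lucasB_step, ne_eq, one_ne_zero, not_false_eq_true, if_true, hck,
          Prod.mk.injEq]
        refine ⟨?_, ?_, ?_⟩
        · rw [d2]
        · have e : 2*k'+1+1 = 2*(k'+1) := by ring
          rw [e, d1', pow_succ]; ring
        · have e : 2*k'+1 = k'+k'+1 := by ring
          rw [e, pow_succ, pow_add]
      · have hz : m % 2 = 0 := by omega
        have hck : k = 2 * k' := by omega
        rw [hz]
        simp only [lucasB_step, ne_eq, not_true_eq_false, if_false, hck, Prod.mk.injEq]
        refine ⟨?_, ?_, ?_⟩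
        · rw [d1]
        · rw [d2]
        · have e : 2*k' = k'+k' := by ring
          rw [e, pow_add]
    · rw [dif_neg hgt]
      have hk1 : k = 1 := by omega
      subst hk1
      simp only [List.reverse_nil, List.foldl_nil, Prod.mk.injEq]
      refine ⟨by simp [lucasV], ?_, by simp⟩
      have hV2 : lucasV p q (1+1) = p * lucasV p q 1 - q * lucasV p q 0 := rfl
      rw [hV2]
      simp only [lucasV]
      ring

-- ===== VERDICT (by name: the statement is the Claim_ definition above) =====
theorem lucas_sequences_second_kind_spec : Claim_equal_lucas_sequences_second_kind := by
  intro n p q _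
  unfold Spec_lucas_sequences_second_kind
  unfold lucas_sequences_second_kind lucas_sequences_second_kind_alt
  by_cases h0 : n = 0
  · simp [h0]
  · rw [if_neg h0, if_neg h0]
    by_cases hpos : 1 ≤ n
    · -- main case: both sides equal V_{n.toNat}
      have hA := lucasA_loop_eq (n-1).toNat ⟨0, 1, -q, p⟩ ⟨0, 1, -q, p⟩ (n-1) (by omega) rfl
      simp only at hA
      rw [hA]
      have hAB : mmul (mpow ⟨0, 1, -q, p⟩ (n-1).toNat) ⟨0, 1, -q, p⟩
               = mpow ⟨0, 1, -q, p⟩ n.toNat := by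
        rw [mpow_succ_right]
        congr 1
        omega
      rw [hAB]
      have hE := (mpow_entries p q n.toNat).1
      have hB := lucasB_fold_eq p q n.toNat n hpos rfl
      rw [hB]
      simpa using hE
    · -- n < 0: A falls through the loop, B collects no bits; both return p
      have hn : n < 0 := by omega
      rw [lucasA_loop, dif_neg (by omega : ¬ (n - 1 > 0))]
      rw [lucasB_bits, dif_neg (by omega : ¬ (n > 1))]
      simp only [List.reverse_nil, List.foldl_nil]
      ring
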